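-- pv_equiv track=rewrite | github.com/LeiRoF/M2-Internship | rsrc/main.py | gpu_runlist
-- ===== SOURCE A (Python) =====
-- def gpu_runlist(p):
--     """
--     Function that return a list that allows to distribute SOC and LOC tasks
--     on mulitple GPUs
--
--     Arguments:
--     ----------
--         p: Dictionnary
--             Dictionnary containing the value of each parameter
--
--     Return:
--     -------
--         outlist: list
--             List containing number of task to run simultaneously
--
--     """
--
--     nbcore = p['nbcore']
--     increment = p['nbgpu']
--
--     outlist = []
--
--     while nbcore > 0:
--         if nbcore-increment < 0:
--             increment += (nbcore-increment)
--         nbcore -= increment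
--         outlist.append(increment)
--
--     return outlist
-- ===== SOURCE B (Python) =====
-- def gpu_runlist(p):
--     nbcore = p['nbcore']
--     nbgpu = p['nbgpu']
--     if nbcore <= 0:
--         return []
--     full, rem = divmod(nbcore, nbgpu)
--     outlist = [nbgpu] * full
--     if rem:
--         outlist.append(rem)
--     return outlist
-- ===== Notes on version B (the rewrite author's own statement) =====
-- stated objective: simpler
-- what changed: Replaces the decrementing while-loop that appends one chunk per iteration with a closed-form divmod: [nbgpu]*(nbcore//nbgpu) plus the remainder if nonzero.
import Mathlib
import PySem

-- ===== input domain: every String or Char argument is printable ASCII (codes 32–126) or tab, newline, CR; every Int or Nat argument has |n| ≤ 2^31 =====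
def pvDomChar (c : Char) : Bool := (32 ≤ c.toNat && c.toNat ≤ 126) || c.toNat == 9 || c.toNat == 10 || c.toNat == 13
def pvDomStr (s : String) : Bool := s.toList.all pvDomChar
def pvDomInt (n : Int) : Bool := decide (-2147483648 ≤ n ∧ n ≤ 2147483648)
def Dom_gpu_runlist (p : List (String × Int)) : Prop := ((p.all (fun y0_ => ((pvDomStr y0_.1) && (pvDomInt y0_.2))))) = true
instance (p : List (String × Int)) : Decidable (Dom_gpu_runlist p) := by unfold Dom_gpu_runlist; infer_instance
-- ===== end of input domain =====

-- B replaces A's decrementing while-loop by a closed-form divmod construction (same return value on Pre_).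

-- ===== PORT A =====
-- p['k'] on the dict argument: first match in the association list
def pyLookup : List (String × Int) → String → Option Int
  | [], _ => none
  | (k, v) :: rest, key => if k = key then some v else pyLookup rest key

-- the while loop of A; fuel = nbcore.toNat suffices since each iteration removes at least 1 when increment > 0
def gpuLoopA (fuel : Nat) (nbcore increment : Int) (outlist : List Int) : List Int :=
  match fuel with
  | 0 => outlist
  | f + 1 =>
    if nbcore > 0 then
      let increment' := if nbcore - increment < 0 then increment + (nbcore - increment) else increment
      gpuLoopA f (nbcore - increment') increment' (outlist ++ [increment'])
    else outlist

def gpu_runlist (p : List (String × Int)) : List Int :=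
  let nbcore := (pyLookup p "nbcore").getD 0
  let increment := (pyLookup p "nbgpu").getD 0
  gpuLoopA nbcore.toNat nbcore increment []

-- ===== PORT B =====
def gpu_runlist_alt (p : List (String × Int)) : List Int :=
  let nbcore := (pyLookup p "nbcore").getD 0
  let nbgpu := (pyLookup p "nbgpu").getD 0
  if nbcore ≤ 0 then []
  else
    let full := PySem.Int.floordiv nbcore nbgpu
    let rem := PySem.Int.mod nbcore nbgpu
    let outlist := List.replicate full.toNat nbgpu
    if rem ≠ 0 then outlist ++ [rem] else outlist

-- ===== PRECONDITION & SPEC =====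
-- Pre_ excludes inputs where A raises KeyError (missing 'nbcore'/'nbgpu') and where A loops forever
-- (nbcore > 0 with nbgpu ≤ 0); A returns a value on everything Pre_ admits.
def Pre_gpu_runlist (p : List (String × Int)) : Prop :=
  (p.lookup "nbcore").isSome ∧ (p.lookup "nbgpu").isSome ∧
  ((p.lookup "nbcore").getD 0 ≤ 0 ∨ 0 < (p.lookup "nbgpu").getD 0)
instance (p : List (String × Int)) : Decidable (Pre_gpu_runlist p) := by unfold Pre_gpu_runlist; infer_instance

def pvWitness_gpu_runlist : (List (String × Int)) := [("nbcore", 5), ("nbgpu", 2)]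

def Spec_gpu_runlist (p : List (String × Int)) (out : List Int) : Prop := out = gpu_runlist_alt p
instance (p : List (String × Int)) (out : List Int) : Decidable (Spec_gpu_runlist p out) := by unfold Spec_gpu_runlist; infer_instance

-- ===== CLAIM (what is proved, stated in full; the proofs are below) =====
def Claim_equal_gpu_runlist : Prop := ∀ (p : List (String × Int)), Dom_gpu_runlist p → Pre_gpu_runlist p → Spec_gpu_runlist p (gpu_runlist p)

-- ===== LEMMAS AND PROOFS =====

lemma pyLookup_eq_lookup (p : List (String × Int)) (k : String) :
    pyLookup p k = p.lookup k := by
  induction p with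
  | nil => rfl
  | cons hd tl ih =>
    obtain ⟨k', v⟩ := hd
    by_cases h : k' = k
    · simp [pyLookup, List.lookup, h]
    · have hb : (k == k') = false := by simp [Ne.symm h]
      simp [pyLookup, List.lookup, h, ih, hb]

-- closed form of the list B builds, used only inside the proofs
def gpuClosed (n g : Int) : List Int :=
  if n ≤ 0 then []
  else List.replicate (PySem.Int.floordiv n g).toNat g ++
       (if PySem.Int.mod n g ≠ 0 then [PySem.Int.mod n g] else [])

lemma gpuLoopA_nonpos (fuel : Nat) (n inc : Int) (acc : List Int) (h : n ≤ 0) :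
    gpuLoopA fuel n inc acc = acc := by
  cases fuel with
  | zero => rfl
  | succ f => simp [gpuLoopA]; omega

lemma gpuClosed_small {n g : Int} (h0 : 0 < n) (h : n < g) : gpuClosed n g = [n] := by
  have hg : 0 < g := lt_trans h0 h
  have hq : PySem.Int.floordiv n g = 0 := by
    rw [PySem.Int.floordiv_eq_iff_of_pos hg]; constructor <;> omega
  have hm : PySem.Int.mod n g = n := by
    have := PySem.Int.floordiv_mul_add_mod n g
    rw [hq] at this; omega
  unfold gpuClosed
  rw [if_neg (by omega : ¬ n ≤ 0), hq, hm, if_pos (by omega : n ≠ 0)]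
  simp

lemma gpuClosed_step {n g : Int} (hg : 0 < g) (h : g ≤ n) :
    gpuClosed n g = g :: gpuClosed (n - g) g := by
  have hq : PySem.Int.floordiv n g = PySem.Int.floordiv (n - g) g + 1 := by
    rw [PySem.Int.floordiv_eq_ediv_of_pos hg, PySem.Int.floordiv_eq_ediv_of_pos hg]
    have h3 : n - g + 1 * g = n := by ring
    nth_rewrite 1 [← h3]
    exact Int.add_mul_ediv_right _ _ (by omega : g ≠ 0)
  have hm : PySem.Int.mod n g = PySem.Int.mod (n - g) g := by
    have h1 := PySem.Int.floordiv_mul_add_mod n g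
    have h2 := PySem.Int.floordiv_mul_add_mod (n - g) g
    rw [hq] at h1; nlinarith [h1, h2]
  by_cases hng : n - g ≤ 0
  · -- n = g
    have hne : n = g := le_antisymm (by omega) h
    have hq0 : PySem.Int.floordiv (n - g) g = 0 := by
      rw [PySem.Int.floordiv_eq_iff_of_pos hg]; constructor <;> omega
    have hm0 : PySem.Int.mod (n - g) g = 0 := by
      have := PySem.Int.floordiv_mul_add_mod (n - g) g
      rw [hq0] at this; omega
    simp [gpuClosed, hq, hq0, hm, hm0, hng]
    omega
  · have hqn : 0 ≤ PySem.Int.floordiv (n - g) g := by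
      rw [PySem.Int.floordiv_eq_ediv_of_pos hg]
      exact Int.ediv_nonneg (by omega) (by omega)
    have hrep : (PySem.Int.floordiv (n - g) g + 1).toNat
        = (PySem.Int.floordiv (n - g) g).toNat + 1 := by omega
    simp only [gpuClosed, hq, hm, hrep]
    rw [if_neg (by omega : ¬ n ≤ 0), if_neg (by omega : ¬ n - g ≤ 0)]
    simp [List.replicate_succ]

lemma gpuLoopA_eq_closed (g : Int) (hg : 0 < g) :
    ∀ (fuel : Nat) (n : Int) (acc : List Int), n.toNat ≤ fuel →
      gpuLoopA fuel n g acc = acc ++ gpuClosed n g := by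
  intro fuel
  induction fuel with
  | zero =>
    intro n acc h
    have hn : n ≤ 0 := by omega
    simp [gpuLoopA, gpuClosed, hn]
  | succ f ih =>
    intro n acc h
    by_cases hn : 0 < n
    · by_cases hlt : n - g < 0
      · -- last, partial chunk: increment becomes n, next nbcore is 0
        simp only [gpuLoopA, if_pos hn, if_pos hlt]
        rw [show g + (n - g) = n by ring, sub_self,
            gpuLoopA_nonpos f 0 n _ (le_refl 0), gpuClosed_small hn (by omega)]
      · -- full chunk of size g
        simp only [gpuLoopA, if_pos hn, if_neg hlt]
        rw [ih (n - g) (acc ++ [g]) (by omega), gpuClosed_step (n := n) hg (by omega)]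
        simp
    · rw [gpuLoopA_nonpos _ _ _ _ (by omega), gpuClosed, if_pos (by omega)]
      simp

-- ===== VERDICT (by name: the statement is the Claim_ definition above) =====
theorem gpu_runlist_spec : Claim_equal_gpu_runlist := by
  intro p _ hpre
  obtain ⟨hn, hgk, hcase⟩ := hpre
  rw [← pyLookup_eq_lookup p "nbcore", ← pyLookup_eq_lookup p "nbgpu"] at hcase
  unfold Spec_gpu_runlist gpu_runlist gpu_runlist_alt
  set n := (pyLookup p "nbcore").getD 0 with hns
  set g := (pyLookup p "nbgpu").getD 0 with hgs
  rcases hcase with hle | hgpos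
  · rw [gpuLoopA_nonpos _ _ _ _ hle, if_pos hle]
  · rw [gpuLoopA_eq_closed g hgpos n.toNat n [] (le_refl _)]
    simp only [List.nil_append]
    unfold gpuClosed
    split_ifs <;> simp
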